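-- pv_equiv track=rewrite | github.com/backmind/debtx | debtx/detectors/_text.py | strip_string_literals
-- ===== SOURCE A (Python) =====
-- def strip_string_literals(line: str) -> str:
--     out: list[str] = []
--     i = 0
--     n = len(line)
--     while i < n:
--         c = line[i]
--         if c in ('"', "'", "`"):
--             j = i + 1
--             while j < n:
--                 if line[j] == "\\":
--                     j += 2
--                     continue
--                 if line[j] == c:
--                     j += 1
--                     break
--                 j += 1
--             i = j
--         else:
--             out.append(c)
--             i += 1
--     return "".join(out)
-- ===== SOURCE B (Python) =====
-- def strip_string_literals(line: str) -> str:
--     out = []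
--     quote = None
--     escape = False
--     for ch in line:
--         if quote is None:
--             if ch in ('"', "'", "`"):
--                 quote = ch
--             else:
--                 out.append(ch)
--         elif escape:
--             escape = False
--         elif ch == "\\":
--             escape = True
--         elif ch == quote:
--             quote = None
--     return "".join(out)
-- ===== Notes on version B (the rewrite author's own statement) =====
-- stated objective: simpler
-- what changed: Replaces A's nested index-based skip-loop with a single flat pass keeping two state variables (open quote char, escape flag).
import Mathlib
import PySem

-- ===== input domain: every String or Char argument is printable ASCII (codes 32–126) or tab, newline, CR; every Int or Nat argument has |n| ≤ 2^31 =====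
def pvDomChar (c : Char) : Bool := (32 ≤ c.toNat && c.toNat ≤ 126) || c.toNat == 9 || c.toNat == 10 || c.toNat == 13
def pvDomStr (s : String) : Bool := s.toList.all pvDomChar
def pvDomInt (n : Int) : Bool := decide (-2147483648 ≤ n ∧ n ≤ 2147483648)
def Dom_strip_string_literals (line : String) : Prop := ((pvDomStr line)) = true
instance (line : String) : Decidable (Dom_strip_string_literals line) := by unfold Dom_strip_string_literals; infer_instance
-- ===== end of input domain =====

-- B replaces A's nested skip-to-closing-quote loop with one flat pass holding a quote/escape state pair (objective: simpler).

-- ===== PORT A =====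
-- A's inner while loop: scan forward for the closing quote, a backslash skips the next char (j += 2).
def stripSkipA (c : Char) : List Char → List Char
  | [] => []
  | x :: rest =>
    if x = '\\' then stripSkipA c (rest.drop 1)
    else if x = c then rest
    else stripSkipA c rest
  termination_by l => l.length
  decreasing_by
  · simp only [List.length_drop, List.length_cons]; omega
  · simp only [List.length_cons]; omega

theorem stripSkipA_length_le (c : Char) (l : List Char) : (stripSkipA c l).length ≤ l.length := by
  match l with
  | [] => simp [stripSkipA]
  | x :: rest =>
    rw [stripSkipA]
    split
    · have h1 := stripSkipA_length_le c (rest.drop 1)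
      simp only [List.length_drop] at h1
      simp only [List.length_cons]; omega
    · split
      · simp
      · have := stripSkipA_length_le c rest
        simp only [List.length_cons]; omega
  termination_by l.length
  decreasing_by
  all_goals try simp only [List.length_drop, List.length_cons]
  all_goals omega

-- A's outer while loop over the characters of the line.
def stripLoopA : List Char → List Char
  | [] => []
  | x :: rest =>
    if x = '"' ∨ x = '\'' ∨ x = '`' then stripLoopA (stripSkipA x rest)
    else x :: stripLoopA rest
  termination_by l => l.length
  decreasing_by
  · have := stripSkipA_length_le x rest; simp only [List.length_cons]; omega
  · simp only [List.length_cons]; omega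

def strip_string_literals (line : String) : String :=
  String.ofList (stripLoopA line.toList)

-- ===== PORT B =====
-- B's per-character step over the state (quote, escape, out), mirroring Source B's branch order.
def stripStepB (s : Option Char × Bool × List Char) (ch : Char) : Option Char × Bool × List Char :=
  match s with
  | (none, e, out) =>
    if ch = '"' ∨ ch = '\'' ∨ ch = '`' then (some ch, e, out) else (none, e, out ++ [ch])
  | (some q, true, out) => (some q, false, out)
  | (some q, false, out) =>
    if ch = '\\' then (some q, true, out)
    else if ch = q then (none, false, out)
    else (some q, false, out)

def strip_string_literals_alt (line : String) : String :=
  String.ofList (List.foldl stripStepB (none, false, []) line.toList).2.2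

-- ===== PRECONDITION & SPEC =====
def Spec_strip_string_literals (line : String) (out : String) : Prop := out = strip_string_literals_alt line
instance (line : String) (out : String) : Decidable (Spec_strip_string_literals line out) := by unfold Spec_strip_string_literals; infer_instance

-- ===== CLAIM (what is proved, stated in full; the proofs are below) =====
def Claim_equal_strip_string_literals : Prop := ∀ (line : String), Dom_strip_string_literals line → Spec_strip_string_literals line (strip_string_literals line)

-- ===== LEMMAS AND PROOFS =====

-- Inside a string literal, B appends nothing and returns to quote = none exactly where A's skip loop exits.
theorem foldB_some (c : Char) (l acc : List Char) :
    (List.foldl stripStepB (some c, false, acc) l).2.2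
      = (List.foldl stripStepB (none, false, acc) (stripSkipA c l)).2.2 := by
  match l with
  | [] => simp [stripSkipA]
  | x :: rest =>
    by_cases hx : x = '\\'
    · subst hx
      match rest with
      | [] => simp [stripSkipA, stripStepB]
      | y :: rest' =>
        simp only [List.foldl_cons, stripStepB, stripSkipA, List.drop_succ_cons,
          List.drop_zero]
        exact foldB_some c rest' acc
    · by_cases hc : x = c
      · subst hc
        simp [stripSkipA, stripStepB, hx]
      · simp only [List.foldl_cons, stripStepB, if_neg hx, if_neg hc, stripSkipA]
        exact foldB_some c rest acc
  termination_by l.length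

-- Outside string literals, B's output is the accumulator followed by A's output.
theorem foldB_none (l acc : List Char) :
    (List.foldl stripStepB (none, false, acc) l).2.2 = acc ++ stripLoopA l := by
  match l with
  | [] => simp [stripLoopA]
  | x :: rest =>
    by_cases hq : x = '"' ∨ x = '\'' ∨ x = '`'
    · have hle := stripSkipA_length_le x rest
      simp only [List.foldl_cons, stripStepB, stripLoopA, hq, if_true]
      rw [foldB_some x rest acc, foldB_none (stripSkipA x rest) acc]
    · simp only [List.foldl_cons, stripStepB, stripLoopA, hq, if_false]
      rw [foldB_none rest (acc ++ [x])]
      simp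
  termination_by l.length
  decreasing_by
  · simp; omega
  · simp only [List.length_cons]; omega

-- ===== VERDICT (by name: the statement is the Claim_ definition above) =====
theorem strip_string_literals_spec : Claim_equal_strip_string_literals := by
  intro line _
  unfold Spec_strip_string_literals strip_string_literals strip_string_literals_alt
  rw [foldB_none]
  simp
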